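-- pv_equiv track=rewrite | github.com/pednekaratharva/PBL- | maze.py | find_start_end_points
-- ===== SOURCE A (Python) =====
-- def find_start_end_points(maze):
--     """Find start and end points in the maze."""
--     height = len(maze)
--     width = len(maze[0]) if height > 0 else 0
--
--     # Find start point (first path cell from top-left)
--     start_row, start_col = None, None
--     for r in range(height):
--         for c in range(width):
--             if maze[r][c] == 0:
--                 start_row, start_col = r, c
--                 break
--         if start_row is not None:
--             break
--
--     # Find end point (last path cell from bottom-right)
--     end_row, end_col = None, None
--     for r in range(height - 1, -1, -1):
--         for c in range(width - 1, -1, -1):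
--             if maze[r][c] == 0:
--                 end_row, end_col = r, c
--                 break
--         if end_row is not None:
--             break
--
--     return (start_row, start_col), (end_row, end_col)
-- ===== SOURCE B (Python) =====
-- def find_start_end_points(maze):
--     """Find start and end points in the maze (single forward pass)."""
--     height = len(maze)
--     width = len(maze[0]) if height > 0 else 0
--     start = None
--     end = None
--     for r in range(height):
--         row = maze[r]
--         for c in range(width):
--             if row[c] == 0:
--                 if start is None:
--                     start = (r, c)
--                 end = (r, c)
--     s = start if start is not None else (None, None)
--     e = end if end is not None else (None, None)
--     return s, e
-- ===== Notes on version B (the rewrite author's own statement) =====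
-- stated objective: simpler
-- what changed: A's two opposite-direction early-exit scans (forward for the first path cell, backward for the last) are replaced by one forward pass that tracks both the first and the last zero cell.
-- outside the precondition, e.g. on find_start_end_points([[0], [], [0]]): A returns ((0, 0), (2, 0)), B raises IndexError
import Mathlib
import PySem

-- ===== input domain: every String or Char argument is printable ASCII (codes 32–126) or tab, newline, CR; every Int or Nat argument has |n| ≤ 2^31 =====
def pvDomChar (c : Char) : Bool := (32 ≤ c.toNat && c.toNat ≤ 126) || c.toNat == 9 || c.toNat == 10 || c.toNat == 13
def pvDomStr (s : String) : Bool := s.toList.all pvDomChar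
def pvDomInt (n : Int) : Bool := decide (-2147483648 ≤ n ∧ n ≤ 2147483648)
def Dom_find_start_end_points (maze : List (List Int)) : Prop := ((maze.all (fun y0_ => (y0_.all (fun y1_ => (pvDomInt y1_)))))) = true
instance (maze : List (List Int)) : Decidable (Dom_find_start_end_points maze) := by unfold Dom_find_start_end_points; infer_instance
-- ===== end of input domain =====

-- B replaces A's two opposite-direction early-exit scans by one forward pass tracking first and last path cell (objective: simpler).
-- Inside Pre_ every index the Python reads is in range, so the ports' `getD _ 1` reads are exact there.

-- ===== PORT A =====
-- inner `for c in range(width)` with break: first c < w with maze[r][c] == 0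
def pvFwdRow (row : List Int) (w : Nat) (c : Nat) : Option Nat :=
  if c < w then
    if row.getD c 1 = 0 then some c else pvFwdRow row w (c + 1)
  else none
termination_by w - c

-- outer `for r in range(height)` with break once start is set
def pvFwdScan (rows : List (List Int)) (w : Nat) (r : Nat) : Option (Nat × Nat) :=
  match rows with
  | [] => none
  | row :: rest =>
    match pvFwdRow row w 0 with
    | some c => some (r, c)
    | none => pvFwdScan rest w (r + 1)

-- inner `for c in range(width-1,-1,-1)` with break: k is one past the next index to try
def pvBwdRow (row : List Int) (k : Nat) : Option Nat :=
  match k with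
  | 0 => none
  | k + 1 => if row.getD k 1 = 0 then some k else pvBwdRow row k

-- outer `for r in range(height-1,-1,-1)` with break
def pvBwdScan (maze : List (List Int)) (w : Nat) (k : Nat) : Option (Nat × Nat) :=
  match k with
  | 0 => none
  | k + 1 =>
    match pvBwdRow (maze.getD k []) w with
    | some c => some (k, c)
    | none => pvBwdScan maze w k

def find_start_end_points (maze : List (List Int)) : (Option Int × Option Int) × (Option Int × Option Int) :=
  let width : Nat := match maze with | [] => 0 | r0 :: _ => r0.length
  let s := pvFwdScan maze width 0
  let e := pvBwdScan maze width maze.length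
  ((match s with | some (r, c) => (some (r : Int), some (c : Int)) | none => (none, none)),
   (match e with | some (r, c) => (some (r : Int), some (c : Int)) | none => (none, none)))

-- ===== PORT B =====
-- update of (start, end) at a path cell p: keep start if already set, always move end
def pvBStep (st : Option (Nat × Nat) × Option (Nat × Nat)) (p : Nat × Nat) :
    Option (Nat × Nat) × Option (Nat × Nat) :=
  ((match st.1 with | none => some p | some q => some q), some p)

def pvPack (p : Option (Nat × Nat)) : Option Int × Option Int :=
  match p with
  | some (r, c) => (some (r : Int), some (c : Int))
  | none => (none, none)

def find_start_end_points_alt (maze : List (List Int)) : (Option Int × Option Int) × (Option Int × Option Int) :=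
  let height := maze.length
  let width : Nat := match maze with | [] => 0 | r0 :: _ => r0.length
  let st := (List.range height).foldl
    (fun st r =>
      let row := maze.getD r []
      (List.range width).foldl
        (fun st c => if row.getD c 1 = 0 then pvBStep st (r, c) else st) st)
    (none, none)
  (pvPack st.1, pvPack st.2)

-- ===== PRECONDITION & SPEC =====
-- Pre_ excludes ragged mazes (a row shorter than the first row): there Python A raises
-- IndexError except when early breaks happen to skip the short row, and B raises.
def Pre_find_start_end_points (maze : List (List Int)) : Prop :=
  ∀ row ∈ maze, (match maze with | [] => ([] : List Int) | r0 :: _ => r0).length ≤ row.length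
instance (maze : List (List Int)) : Decidable (Pre_find_start_end_points maze) := by
  unfold Pre_find_start_end_points; infer_instance

def pvWitness_find_start_end_points : List (List Int) := [[1, 0], [0, 1]]

def Spec_find_start_end_points (maze : List (List Int)) (out : (Option Int × Option Int) × (Option Int × Option Int)) : Prop := out = find_start_end_points_alt maze
instance (maze : List (List Int)) (out : (Option Int × Option Int) × (Option Int × Option Int)) : Decidable (Spec_find_start_end_points maze out) := by unfold Spec_find_start_end_points; infer_instance

-- ===== CLAIM (what is proved, stated in full; the proofs are below) =====
def Claim_equal_find_start_end_points : Prop := ∀ (maze : List (List Int)), Dom_find_start_end_points maze → Pre_find_start_end_points maze → Spec_find_start_end_points maze (find_start_end_points maze)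

-- ===== LEMMAS AND PROOFS =====

-- zero-column detector and the row-major list of path cells
def pvFcol (row : List Int) (c : Nat) : Option Nat :=
  if row.getD c 1 = 0 then some c else none

def pvZ (maze : List (List Int)) (w h : Nat) : List (Nat × Nat) :=
  (List.range h).flatMap
    (fun r => ((List.range w).filterMap (pvFcol (maze.getD r []))).map (fun c => (r, c)))

theorem pvOr_of_isSome {α : Type} (x y : Option α) (h : x.isSome) : x.or y = x := by
  cases x
  · simp at h
  · rfl

theorem pvOr_none {α : Type} (x : Option α) : x.or none = x := by cases x <;> rfl

theorem pvGetLast?_cons {α : Type} (p : α) (t : List α) :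
    (p :: t).getLast? = t.getLast?.or (some p) := by
  induction t generalizing p with
  | nil => rfl
  | cons q s ih =>
    have h : ((q :: s).getLast?).isSome := by
      rw [ih q]; cases s.getLast? <;> rfl
    rw [List.getLast?_cons_cons]
    exact (pvOr_of_isSome _ (some p) h).symm

theorem pvFwdRow_eq (row : List Int) (w : Nat) :
    ∀ (n c0 : Nat), c0 + n = w →
      pvFwdRow row w c0 = ((List.range' c0 n).filterMap (pvFcol row)).head? := by
  intro n
  induction n with
  | zero =>
    intro c0 h
    rw [pvFwdRow, if_neg (by omega)]
    rfl
  | succ n ih =>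
    intro c0 h
    have hlt : c0 < w := by omega
    rw [pvFwdRow, if_pos hlt, List.range'_succ]
    by_cases hz : row.getD c0 1 = 0
    · have hf : pvFcol row c0 = some c0 := by rw [pvFcol, if_pos hz]
      have h1 : List.filterMap (pvFcol row) (c0 :: List.range' (c0 + 1) n)
          = c0 :: List.filterMap (pvFcol row) (List.range' (c0 + 1) n) := by
        rw [List.filterMap_cons, hf]
      rw [if_pos hz, h1]
      rfl
    · have hf : pvFcol row c0 = none := by rw [pvFcol, if_neg hz]
      have h1 : List.filterMap (pvFcol row) (c0 :: List.range' (c0 + 1) n)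
          = List.filterMap (pvFcol row) (List.range' (c0 + 1) n) := by
        rw [List.filterMap_cons, hf]
      rw [if_neg hz, h1]
      exact ih (c0 + 1) (by omega)

theorem pvFwdRow_head (row : List Int) (w : Nat) :
    pvFwdRow row w 0 = ((List.range w).filterMap (pvFcol row)).head? := by
  rw [List.range_eq_range']
  exact pvFwdRow_eq row w w 0 (by omega)

theorem pvBwdRow_eq (row : List Int) :
    ∀ (k : Nat), pvBwdRow row k = ((List.range k).filterMap (pvFcol row)).getLast? := by
  intro k
  induction k with
  | zero => rfl
  | succ k ih =>
    rw [pvBwdRow, List.range_succ, List.filterMap_append]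
    by_cases hz : row.getD k 1 = 0
    · have hf : pvFcol row k = some k := by rw [pvFcol, if_pos hz]
      have h1 : List.filterMap (pvFcol row) [k] = [k] := by rw [List.filterMap_cons, hf]; rfl
      rw [if_pos hz, h1, List.getLast?_concat]
    · have hf : pvFcol row k = none := by rw [pvFcol, if_neg hz]
      have h1 : List.filterMap (pvFcol row) [k] = [] := by rw [List.filterMap_cons, hf]; rfl
      rw [if_neg hz, h1, List.append_nil, ih]

-- forward scan over the actual rows = head of the row-major path-cell list
theorem pvFwdScan_eq (w : Nat) :
    ∀ (rows : List (List Int)) (r0 : Nat) (maze : List (List Int)),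
      (∀ i, i < rows.length → maze.getD (r0 + i) [] = rows.getD i []) →
      pvFwdScan rows w r0 =
        ((List.range' r0 rows.length).flatMap
          (fun r => ((List.range w).filterMap (pvFcol (maze.getD r []))).map (fun c => (r, c)))).head? := by
  intro rows
  induction rows with
  | nil => intro r0 maze _; rfl
  | cons row rest ih =>
    intro r0 maze hget
    have h0 : maze.getD r0 [] = row := by simpa using hget 0 (by simp)
    rw [pvFwdScan, pvFwdRow_head row w]
    rw [List.length_cons, List.range'_succ, List.flatMap_cons, h0]
    cases hc : (List.range w).filterMap (pvFcol row) with
    | nil =>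
      simp only [List.map_nil, List.nil_append, List.head?_nil]
      exact ih (r0 + 1) maze (fun i hi => by
        have := hget (i + 1) (by simpa using Nat.succ_lt_succ hi)
        simpa [Nat.add_assoc, Nat.add_comm 1 i] using this)
    | cons a t =>
      simp only [List.map_cons, List.cons_append, List.head?_cons]

theorem pvBwdScan_eq (maze : List (List Int)) (w : Nat) :
    ∀ (k : Nat), pvBwdScan maze w k = (pvZ maze w k).getLast? := by
  intro k
  induction k with
  | zero => rfl
  | succ k ih =>
    rw [pvBwdScan, pvBwdRow_eq (maze.getD k []) w, pvZ, List.range_succ, List.flatMap_append,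
        List.getLast?_append]
    simp only [List.flatMap_cons, List.flatMap_nil, List.append_nil, List.getLast?_map]
    rw [← pvZ, ← ih]
    cases hc : ((List.range w).filterMap (pvFcol (maze.getD k []))).getLast? with
    | some c => rfl
    | none => rfl

-- B's fold over one list of path cells tracks (first, last)
theorem pvBStep_fold :
    ∀ (l : List (Nat × Nat)) (a b : Option (Nat × Nat)),
      l.foldl pvBStep (a, b) = (a.or l.head?, l.getLast?.or b) := by
  intro l
  induction l with
  | nil => intro a b; cases a <;> rfl
  | cons p t ih =>
    intro a b
    have hstep : pvBStep (a, b) p = (a.or (some p), some p) := by cases a <;> rfl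
    have h1 : (a.or (some p)).or t.head? = a.or (some p) := by cases a <;> rfl
    have h2 : (t.getLast?.or (some p)).or b = t.getLast?.or (some p) :=
      pvOr_of_isSome _ _ (by cases t.getLast? <;> rfl)
    rw [List.foldl_cons, hstep, ih, List.head?_cons, pvGetLast?_cons, h1, h2]

-- B's inner loop = fold over the path cells of that row
theorem pvInner_eq (row : List Int) (r : Nat) :
    ∀ (ks : List Nat) (st : Option (Nat × Nat) × Option (Nat × Nat)),
      ks.foldl (fun st c => if row.getD c 1 = 0 then pvBStep st (r, c) else st) st
        = ((ks.filterMap (pvFcol row)).map (fun c => (r, c))).foldl pvBStep st := by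
  intro ks
  induction ks with
  | nil => intro st; rfl
  | cons c t ih =>
    intro st
    by_cases hz : row.getD c 1 = 0
    · have hf : pvFcol row c = some c := by rw [pvFcol, if_pos hz]
      have h1 : List.filterMap (pvFcol row) (c :: t) = c :: List.filterMap (pvFcol row) t := by
        rw [List.filterMap_cons, hf]
      rw [List.foldl_cons, if_pos hz, h1, List.map_cons, List.foldl_cons]
      exact ih _
    · have hf : pvFcol row c = none := by rw [pvFcol, if_neg hz]
      have h1 : List.filterMap (pvFcol row) (c :: t) = List.filterMap (pvFcol row) t := by
        rw [List.filterMap_cons, hf]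
      rw [List.foldl_cons, if_neg hz, h1]
      exact ih st

-- B's double loop = fold over the whole row-major path-cell list
theorem pvOuter_eq (maze : List (List Int)) (w : Nat) :
    ∀ (ks : List Nat) (st : Option (Nat × Nat) × Option (Nat × Nat)),
      ks.foldl (fun st r =>
          (List.range w).foldl
            (fun st c => if (maze.getD r []).getD c 1 = 0 then pvBStep st (r, c) else st) st) st
        = (ks.flatMap
            (fun r => ((List.range w).filterMap (pvFcol (maze.getD r []))).map (fun c => (r, c)))).foldl
            pvBStep st := by
  intro ks
  induction ks with
  | nil => intro st; rfl
  | cons r t ih =>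
    intro st
    rw [List.foldl_cons, List.flatMap_cons, List.foldl_append, pvInner_eq]
    exact ih _

theorem pvAlt_eq (maze : List (List Int)) :
    find_start_end_points_alt maze =
      (pvPack ((pvZ maze (match maze with | [] => 0 | r0 :: _ => r0.length) maze.length).head?),
       pvPack ((pvZ maze (match maze with | [] => 0 | r0 :: _ => r0.length) maze.length).getLast?)) := by
  simp only [find_start_end_points_alt]
  rw [pvOuter_eq, pvBStep_fold, pvZ, pvOr_none]
  rfl

theorem pvA_eq (maze : List (List Int)) :
    find_start_end_points maze =
      (pvPack ((pvZ maze (match maze with | [] => 0 | r0 :: _ => r0.length) maze.length).head?),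
       pvPack ((pvZ maze (match maze with | [] => 0 | r0 :: _ => r0.length) maze.length).getLast?)) := by
  simp only [find_start_end_points]
  rw [pvFwdScan_eq _ maze 0 maze (fun i hi => by simp), pvBwdScan_eq,
      ← List.range_eq_range', pvZ]
  rfl

-- ===== VERDICT (by name: the statement is the Claim_ definition above) =====
theorem find_start_end_points_spec : Claim_equal_find_start_end_points := by
  intro maze _ _
  unfold Spec_find_start_end_points
  rw [pvA_eq, pvAlt_eq]
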